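-- pv_equiv track=rewrite | github.com/Hemanthreddiee12/Daily_Programming_Challenge_2024 | DAY-14(COUNT SUBSTRINGS).py | count_k_distinct_substrings
-- ===== SOURCE A (Python) =====
-- def count_k_distinct_substrings(s, k):
--     count = 0
--
--     for start in range(len(s)):
--         distinct_chars = {}
--         distinct_count = 0
--
--         for end in range(start, len(s)):
--             char = s[end]
--
--             if char not in distinct_chars:
--                 distinct_chars[char] = 1
--                 distinct_count += 1
--             else:
--                 distinct_chars[char] += 1
--
--             if distinct_count == k:
--                 count += 1
--
--             elif distinct_count > k:
--                 break
--
--     return count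
-- ===== SOURCE B (Python) =====
-- def count_k_distinct_substrings(s, k):
--     n = len(s)
--     return sum(1 for i in range(n) for j in range(i, n) if len(set(s[i:j+1])) == k)
-- ===== Notes on version B (the rewrite author's own statement) =====
-- stated objective: simpler
-- what changed: A's nested scan with an incremental character-count dict, running distinct counter and early break is replaced by a one-line brute-force count of all substrings s[i:j+1] whose character set has size k.
import Mathlib
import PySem

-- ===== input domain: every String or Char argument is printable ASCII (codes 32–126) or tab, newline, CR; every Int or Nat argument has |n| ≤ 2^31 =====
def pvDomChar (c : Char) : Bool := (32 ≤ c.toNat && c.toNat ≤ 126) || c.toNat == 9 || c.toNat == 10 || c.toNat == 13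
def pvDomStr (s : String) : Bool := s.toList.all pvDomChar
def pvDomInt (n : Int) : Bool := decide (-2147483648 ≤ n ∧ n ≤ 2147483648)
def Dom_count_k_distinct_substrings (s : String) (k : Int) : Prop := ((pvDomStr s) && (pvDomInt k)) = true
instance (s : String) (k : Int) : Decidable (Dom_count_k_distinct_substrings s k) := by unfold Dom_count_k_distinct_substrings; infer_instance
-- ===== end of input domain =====

-- B replaces A's nested incremental dict-and-break scan by a plain brute-force count of all
-- substrings whose character set has size k (objective: simpler; not faster).

-- ===== PORT A =====
-- inner loop 'for end in range(start, len(s))' transcribed as recursion over the chars s[start:],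
-- carrying (distinct_chars, distinct_count, count); returning count early models 'break'
def aInner (k : Int) : List Char → PySem.Dict Char Int → Int → Int → Int
  | [], _, _, count => count
  | c :: rest, d, dc, count =>
    let d' := if d.contains c = false then d.insert c 1 else d.modify c 0 (· + 1)
    let dc' := if d.contains c = false then dc + 1 else dc
    if dc' = k then aInner k rest d' dc' (count + 1)
    else if dc' > k then count
    else aInner k rest d' dc' count

def count_k_distinct_substrings (s : String) (k : Int) : Int :=
  (PySem.List.pyRange 0 (PySem.Str.len s) 1).foldl
    (fun count start => aInner k (s.toList.drop start.toNat) PySem.Dict.empty 0 count) 0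

-- ===== PORT B =====
def count_k_distinct_substrings_alt (s : String) (k : Int) : Int :=
  let n := PySem.Str.len s
  ((PySem.List.pyRange 0 n 1).map (fun i =>
    ((PySem.List.pyRange i n 1).map (fun j =>
      if ((PySem.Set.ofList (PySem.List.slice s.toList (some i) (some (j + 1)))).length : Int) = k
      then (1 : Int) else 0)).sum)).sum

-- ===== PRECONDITION & SPEC =====
def Spec_count_k_distinct_substrings (s : String) (k : Int) (out : Int) : Prop := out = count_k_distinct_substrings_alt s k
instance (s : String) (k : Int) (out : Int) : Decidable (Spec_count_k_distinct_substrings s k out) := by unfold Spec_count_k_distinct_substrings; infer_instance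

-- ===== CLAIM (what is proved, stated in full; the proofs are below) =====
def Claim_equal_count_k_distinct_substrings : Prop := ∀ (s : String) (k : Int), Dom_count_k_distinct_substrings s k → Spec_count_k_distinct_substrings s k (count_k_distinct_substrings s k)

-- ===== LEMMAS AND PROOFS =====

-- number of distinct characters of a list, as an Int
def dd (m : List Char) : Int := ((PySem.Set.ofList m).length : Int)

-- the common mathematical value: for each start i, count the prefix lengths t+1 of s[i:]
-- whose distinct-character count is k
def gcount (k : Int) (p rest : List Char) : Int :=
  ((List.range rest.length).map (fun t => if dd (p ++ rest.take (t + 1)) = k then (1 : Int) else 0)).sum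

theorem dd_append_singleton (m : List Char) (c : Char) :
    dd (m ++ [c]) = if c ∈ m then dd m else dd m + 1 := by
  unfold dd
  rw [PySem.Set.ofList_append_singleton]
  by_cases h : c ∈ PySem.Set.ofList m
  · rw [PySem.Set.add_of_mem h]
    simp [PySem.Set.mem_ofList] at h
    simp [h]
  · rw [PySem.Set.add_of_not_mem h]
    simp [PySem.Set.mem_ofList] at h
    simp [h]

theorem dd_le_append (m t : List Char) : dd m ≤ dd (m ++ t) := by
  induction t using List.reverseRecOn with
  | nil => simp
  | append_singleton t c ih =>
      rw [← List.append_assoc, dd_append_singleton]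
      split <;> omega

theorem gcount_zero (k : Int) (p rest : List Char) (h : k < dd p) : gcount k p rest = 0 := by
  unfold gcount
  apply List.sum_eq_zero
  intro x hx
  simp only [List.mem_map] at hx
  obtain ⟨t, _, rfl⟩ := hx
  have := dd_le_append p (rest.take (t + 1))
  split
  · omega
  · rfl

theorem gcount_cons (k : Int) (p : List Char) (c : Char) (rest : List Char) :
    gcount k p (c :: rest) =
      (if dd (p ++ [c]) = k then (1 : Int) else 0) + gcount k (p ++ [c]) rest := by
  unfold gcount
  rw [List.length_cons, List.range_succ_eq_map]
  simp only [List.map_cons, List.sum_cons, List.map_map]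
  refine congrArg₂ (· + ·) ?_ (congrArg List.sum (List.map_congr_left ?_))
  · norm_num
  · intro t _
    simp [Function.comp, List.take_succ_cons]

theorem aInner_eq (k : Int) (rest : List Char) :
    ∀ (p : List Char) (d : PySem.Dict Char Int) (count : Int),
      (∀ c, d.contains c = true ↔ c ∈ p) →
      aInner k rest d (dd p) count = count + gcount k p rest := by
  induction rest with
  | nil => intro p d count _; simp [aInner, gcount]
  | cons c rest ih =>
    intro p d count hinv
    rw [gcount_cons]
    cases hct : d.contains c with
    | false =>
      have hcp : c ∉ p := by
        intro h
        have := (hinv c).mpr h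
        rw [hct] at this
        cases this
      have hdd : dd (p ++ [c]) = dd p + 1 := by rw [dd_append_singleton]; simp [hcp]
      have hinv' : ∀ x, (d.insert c (1 : Int)).contains x = true ↔ x ∈ p ++ [c] := by
        intro x
        rw [PySem.Dict.contains_insert]
        simp only [Bool.or_eq_true, beq_iff_eq, hinv x, List.mem_append, List.mem_singleton]
        exact or_comm
      simp only [aInner, hct, ite_true]
      rw [← hdd]
      by_cases h1 : dd (p ++ [c]) = k
      · rw [if_pos h1, ih _ _ _ hinv', if_pos h1]
        omega
      · rw [if_neg h1]
        by_cases h2 : dd (p ++ [c]) > k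
        · rw [if_pos h2, gcount_zero k (p ++ [c]) rest h2, if_neg h1]
          omega
        · rw [if_neg h2, ih _ _ _ hinv', if_neg h1]
          omega
    | true =>
      have hcp : c ∈ p := (hinv c).mp hct
      have hdd : dd (p ++ [c]) = dd p := by rw [dd_append_singleton]; simp [hcp]
      have hinv' : ∀ x, (d.modify c (0 : Int) (· + 1)).contains x = true ↔ x ∈ p ++ [c] := by
        intro x
        rw [PySem.Dict.contains_modify]
        simp only [Bool.or_eq_true, beq_iff_eq, hinv x, List.mem_append, List.mem_singleton]
        constructor
        · rintro (rfl | h)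
          · exact Or.inl hcp
          · exact Or.inl h
        · rintro (h | rfl)
          · exact Or.inr h
          · exact Or.inl rfl
      simp only [aInner, hct, Bool.true_eq_false, if_false]
      rw [← hdd]
      by_cases h1 : dd (p ++ [c]) = k
      · rw [if_pos h1, ih _ _ _ hinv', if_pos h1]
        omega
      · rw [if_neg h1]
        by_cases h2 : dd (p ++ [c]) > k
        · rw [if_pos h2, gcount_zero k (p ++ [c]) rest h2, if_neg h1]
          omega
        · rw [if_neg h2, ih _ _ _ hinv', if_neg h1]
          omega

theorem aInner_start (k : Int) (rest : List Char) (count : Int) :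
    aInner k rest PySem.Dict.empty 0 count = count + gcount k [] rest := by
  have h0 : dd ([] : List Char) = 0 := by simp [dd, PySem.Set.ofList]
  rw [← h0]
  exact aInner_eq k rest [] PySem.Dict.empty count (by simp [PySem.Dict.contains_empty])

-- fold of a '+ f x' loop is the sum of the map
theorem foldl_acc_sum (f : Int → Int) (xs : List Int) :
    ∀ (a : Int), xs.foldl (fun acc x => acc + f x) a = a + (xs.map f).sum := by
  induction xs with
  | nil => intro a; simp
  | cons x xs ih => intro a; simp [List.foldl_cons, ih]; ring

-- B's inner sum over j ∈ range(i, n) equals gcount over the dropped suffix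
theorem inner_sum_eq (s : List Char) (k : Int) (i : Int) (h0 : 0 ≤ i) (hi : i ≤ (s.length : Int)) :
    ((PySem.List.pyRange i (s.length : Int) 1).map (fun j =>
      if ((PySem.Set.ofList (PySem.List.slice s (some i) (some (j + 1)))).length : Int) = k
      then (1 : Int) else 0)).sum = gcount k [] (s.drop i.toNat) := by
  obtain ⟨a, rfl⟩ : ∃ a : Nat, i = (a : Int) := ⟨i.toNat, by omega⟩
  have ha : a ≤ s.length := by omega
  unfold gcount
  rw [PySem.List.pyRange_one]
  have hlen : ((s.length : Int) - (a : Int)).toNat = (s.drop (a : Int).toNat).length := by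
    simp [List.length_drop]
  rw [hlen, List.map_map]
  apply congrArg List.sum
  apply List.map_congr_left
  intro t _
  have hslice : PySem.List.slice s (some (a : Int)) (some ((a : Int) + (t : Int) + 1)) = (s.drop a).take (t + 1) := by
    have h : ((a : Int) + (t : Int) + 1) = ((a : Int) + ((t + 1 : Nat) : Int)) := by push_cast; ring
    rw [h, PySem.List.slice_natCast_add]
  simp only [Function.comp_apply]
  rw [hslice]
  simp [dd]

-- ===== VERDICT (by name: the statement is the Claim_ definition above) =====
theorem count_k_distinct_substrings_spec : Claim_equal_count_k_distinct_substrings := by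
  intro s k _
  unfold Spec_count_k_distinct_substrings count_k_distinct_substrings count_k_distinct_substrings_alt
  simp only [PySem.Str.len_eq]
  have hA : (fun (count start : Int) => aInner k (s.toList.drop start.toNat) PySem.Dict.empty 0 count)
      = (fun (count start : Int) => count + gcount k [] (s.toList.drop start.toNat)) := by
    funext count start
    exact aInner_start k _ count
  rw [hA, foldl_acc_sum (fun start => gcount k [] (s.toList.drop start.toNat)) _ 0, zero_add]
  apply congrArg List.sum
  symm
  apply List.map_congr_left
  intro i hi
  rw [PySem.List.mem_pyRange_one] at hi
  exact inner_sum_eq s.toList k i hi.1 (by exact_mod_cast hi.2.le)
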